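-- pv_equiv track=rewrite | github.com/kilojoules/Safety-Gym-RL | analyze.py | get_final_metric
-- ===== SOURCE A (Python) =====
-- def get_final_metric(runs: dict, metric: str) -> list:
--     """Get final value of a metric from each seed's run."""
--     values = []
--     for seed, lines in runs.items():
--         # Walk backwards to find last entry with this metric
--         for entry in reversed(lines):
--             if metric in entry:
--                 values.append(entry[metric])
--                 break
--     return values
-- ===== SOURCE B (Python) =====
-- def get_final_metric(runs: dict, metric: str) -> list:
--     """Get final value of a metric from each seed's run."""
--     def merged(lines):
--         m = {}
--         for entry in lines:
--             m.update(entry)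
--         return m
--     return [m[metric] for m in map(merged, runs.values()) if metric in m]
-- ===== Notes on version B (the rewrite author's own statement) =====
-- stated objective: alternative
-- what changed: Per seed B merges all entries into one dict (later entries overwrite) and does a single lookup, building the result by a comprehension over runs.values(), instead of A's per-seed backward scan with early break and explicit append loop.
import Mathlib
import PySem

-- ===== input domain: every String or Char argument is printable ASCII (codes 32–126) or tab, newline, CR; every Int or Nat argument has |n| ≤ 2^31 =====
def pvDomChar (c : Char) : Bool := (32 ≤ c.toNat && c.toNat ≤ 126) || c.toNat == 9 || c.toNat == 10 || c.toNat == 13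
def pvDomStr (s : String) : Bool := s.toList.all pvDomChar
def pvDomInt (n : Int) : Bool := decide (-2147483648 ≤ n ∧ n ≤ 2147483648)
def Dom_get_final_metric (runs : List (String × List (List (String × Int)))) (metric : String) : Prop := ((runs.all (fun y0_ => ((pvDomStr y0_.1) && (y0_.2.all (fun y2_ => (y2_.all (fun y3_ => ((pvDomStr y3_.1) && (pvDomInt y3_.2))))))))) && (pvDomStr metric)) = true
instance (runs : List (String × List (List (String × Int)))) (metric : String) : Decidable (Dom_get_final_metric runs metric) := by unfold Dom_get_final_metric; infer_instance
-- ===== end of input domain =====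

-- B replaces A's per-seed backward scan with early break by merging each seed's entries into one dict (later entries overwrite) followed by a single lookup, with the result built by filterMap/map instead of a foldl-append loop (alternative decomposition, same cost).


-- ===== PORT A =====
-- inner loop of A: walk the (already reversed) entries, return at the first entry containing metric
def pvFindBack (entries : List (List (String × Int))) (metric : String) : Option Int :=
  match entries with
  | [] => none
  | e :: rest =>
    match (PySem.Dict.mk e).get? metric with
    | some v => some v
    | none => pvFindBack rest metric

def get_final_metric (runs : List (String × List (List (String × Int)))) (metric : String) : List Int :=
  runs.foldl (fun values sl =>
    match pvFindBack sl.2.reverse metric with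
    | some v => values ++ [v]
    | none => values) []

-- ===== PORT B =====
-- B's helper merged(lines): an empty dict updated with each entry in order
def pvMerged (lines : List (List (String × Int))) : PySem.Dict String Int :=
  lines.foldl (fun m e => m.update e) PySem.Dict.empty

-- B's comprehension over map(merged, runs.values()): keep m[metric] when metric in m
def get_final_metric_alt (runs : List (String × List (List (String × Int)))) (metric : String) : List Int :=
  (runs.map (fun sl => pvMerged sl.2)).filterMap (fun m => m.get? metric)

-- ===== PRECONDITION & SPEC =====
-- Pre_ requires each entry's keys to be distinct: an entry encodes a Python dict (whose keys are
-- necessarily unique), so duplicate-key association lists correspond to no Python input at all;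
-- on them first-match reads (A) and overwriting merges (B) are both accidental.
def Pre_get_final_metric (runs : List (String × List (List (String × Int)))) (metric : String) : Prop :=
  ∀ sl ∈ runs, ∀ e ∈ sl.2, (e.map Prod.fst).Nodup
instance (runs : List (String × List (List (String × Int)))) (metric : String) : Decidable (Pre_get_final_metric runs metric) := by unfold Pre_get_final_metric; infer_instance
def pvWitness_get_final_metric : (List (String × List (List (String × Int)))) × String :=
  ([("s0", [[("loss", 3), ("acc", 1)], [("loss", 2)]]), ("s1", [[("acc", 7)]])], "loss")

def Spec_get_final_metric (runs : List (String × List (List (String × Int)))) (metric : String) (out : List Int) : Prop := out = get_final_metric_alt runs metric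
instance (runs : List (String × List (List (String × Int)))) (metric : String) (out : List Int) : Decidable (Spec_get_final_metric runs metric out) := by unfold Spec_get_final_metric; infer_instance

-- ===== CLAIM (what is proved, stated in full; the proofs are below) =====
def Claim_equal_get_final_metric : Prop := ∀ (runs : List (String × List (List (String × Int)))) (metric : String), Dom_get_final_metric runs metric → Pre_get_final_metric runs metric → Spec_get_final_metric runs metric (get_final_metric runs metric)

-- ===== LEMMAS AND PROOFS =====

-- updating a dict with a duplicate-free entry: the entry's (first-match) binding wins, else the old dict's
theorem pv_get?_update (e : List (String × Int)) (d : PySem.Dict String Int) (metric : String)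
    (h : (e.map Prod.fst).Nodup) :
    (d.update e).get? metric =
      match (PySem.Dict.mk e).get? metric with
      | some v => some v
      | none => d.get? metric := by
  induction e generalizing d with
  | nil => simp [PySem.Dict.update]; rfl
  | cons kv rest ih =>
    obtain ⟨k, v⟩ := kv
    simp only [List.map_cons, List.nodup_cons] at h
    show ((d.insert k v).update rest).get? metric = _
    rw [ih _ h.2, PySem.Dict.get?_mk_cons]
    rcases eq_or_ne k metric with hk | hk
    · subst hk
      have hnil : (PySem.Dict.mk rest).get? k = none := by
        rw [PySem.Dict.get?_eq_none_iff_not_mem_keys, PySem.Dict.keys_mk]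
        exact fun hm => h.1 hm
      simp [hnil, PySem.Dict.get?_insert_self]
    · rw [if_neg (by simp [hk])]
      rw [PySem.Dict.get?_insert, if_neg (Ne.symm hk)]

-- per seed: A's backward first-hit equals a lookup in B's merged dict
theorem pv_merged_eq (lines : List (List (String × Int))) (metric : String)
    (h : ∀ e ∈ lines, (e.map Prod.fst).Nodup) :
    (pvMerged lines).get? metric = pvFindBack lines.reverse metric := by
  induction lines using List.reverseRecOn with
  | nil => simp [pvMerged, pvFindBack, PySem.Dict.get?_empty]
  | append_singleton rest e ih =>
    have hrest : ∀ e' ∈ rest, (e'.map Prod.fst).Nodup := fun e' he' => h e' (by simp [he'])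
    have he : (e.map Prod.fst).Nodup := h e (by simp)
    unfold pvMerged
    rw [List.foldl_append]
    simp only [List.foldl_cons, List.foldl_nil, List.reverse_append, List.reverse_cons,
      List.reverse_nil, List.nil_append, List.cons_append]
    show ((rest.foldl (fun m e => m.update e) PySem.Dict.empty).update e).get? metric = _
    rw [pv_get?_update e _ metric he]
    unfold pvFindBack
    cases (PySem.Dict.mk e).get? metric with
    | some v => rfl
    | none => exact ih hrest

-- A's foldl-append loop produces acc ++ filterMap
theorem pv_foldl_filterMap (runs : List (String × List (List (String × Int)))) (metric : String)
    (acc : List Int) :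
    runs.foldl (fun values sl =>
      match pvFindBack sl.2.reverse metric with
      | some v => values ++ [v]
      | none => values) acc =
    acc ++ runs.filterMap (fun sl => pvFindBack sl.2.reverse metric) := by
  induction runs generalizing acc with
  | nil => simp
  | cons sl rest ih =>
    simp only [List.foldl_cons, List.filterMap_cons]
    cases pvFindBack sl.2.reverse metric <;> simp [ih]

-- ===== VERDICT (by name: the statement is the Claim_ definition above) =====
theorem get_final_metric_spec : Claim_equal_get_final_metric := by
  intro runs metric _ hpre
  show get_final_metric runs metric = get_final_metric_alt runs metric
  unfold get_final_metric get_final_metric_alt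
  rw [pv_foldl_filterMap, List.nil_append, List.filterMap_map]
  apply List.filterMap_congr
  intro sl hsl
  exact (pv_merged_eq sl.2 metric (hpre sl hsl)).symm
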